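-- pv_equiv track=rewrite | github.com/NickYOOO/Algorithm | 백준/Bronze/2851. 슈퍼 마리오/슈퍼 마리오.py | nearest_to_100
-- ===== SOURCE A (Python) =====
-- def nearest_to_100(scores):
--     total_score = 0
--     previous_score = 0  # 마지막에 더하기 전 점수를 저장할 변수
--     for score in scores:
--         previous_score = total_score  # 더하기 전의 상태를 저장
--         total_score += score
--         if total_score >= 100:
--             break
--
--     if total_score <= 100:
--         return total_score
--     else:
--         if (total_score - 100) <= (100 - previous_score):
--             return total_score
--         else:
--             return previous_score
-- ===== SOURCE B (Python) =====
-- def nearest_to_100(scores):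
--     # two-phase: build prefix-sum table, then find first crossing of 100
--     sums = []
--     t = 0
--     for x in scores:
--         t += x
--         sums.append(t)
--     for i, s in enumerate(sums):
--         if s >= 100:
--             prev = sums[i - 1] if i > 0 else 0
--             return s if s - 100 <= 100 - prev else prev
--     return sums[-1] if sums else 0
-- ===== Notes on version B (the rewrite author's own statement) =====
-- stated objective: alternative
-- what changed: Replaces A's single break-early loop with mutable total/previous state by a two-phase decomposition: build the full prefix-sum table, then a separate scan finds the first sum crossing 100 and decides between it and its predecessor with one uniform comparison (A's 'total <= 100' branch disappears).
import Mathlib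
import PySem

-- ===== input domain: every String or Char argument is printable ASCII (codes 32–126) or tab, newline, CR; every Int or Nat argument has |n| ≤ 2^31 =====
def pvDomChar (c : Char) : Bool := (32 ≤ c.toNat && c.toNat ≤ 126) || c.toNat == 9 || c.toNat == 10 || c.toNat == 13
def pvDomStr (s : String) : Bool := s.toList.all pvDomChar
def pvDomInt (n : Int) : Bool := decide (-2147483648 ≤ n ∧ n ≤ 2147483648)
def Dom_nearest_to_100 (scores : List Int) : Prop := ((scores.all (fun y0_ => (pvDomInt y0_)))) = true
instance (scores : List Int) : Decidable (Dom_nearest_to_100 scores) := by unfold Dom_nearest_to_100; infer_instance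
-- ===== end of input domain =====

-- B replaces A's break-early loop by a two-phase decomposition (prefix-sum table, then a scan); alternative structure, same cost.


-- ===== PORT A =====
-- the for-loop with break: state (total_score, previous_score)
def nearestLoopA : List Int → Int → Int → Int × Int
  | [], t, p => (t, p)
  | x :: xs, t, _ =>
    let p := t
    let t := t + x
    if t ≥ 100 then (t, p) else nearestLoopA xs t p

def nearest_to_100 (scores : List Int) : Int :=
  let r := nearestLoopA scores 0 0
  let total := r.1
  let prev := r.2
  if total ≤ 100 then total
  else if total - 100 ≤ 100 - prev then total else prev

-- ===== PORT B =====
-- phase 1: prefix-sum table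
def buildSums : List Int → Int → List Int
  | [], _ => []
  | x :: xs, t => (t + x) :: buildSums xs (t + x)

-- phase 2: scan for first sum ≥ 100; the carried `prev` is sums[i-1] (0 before the first entry)
def findCross : List Int → Int → Option Int
  | [], _ => none
  | s :: rest, prev =>
    if s ≥ 100 then some (if s - 100 ≤ 100 - prev then s else prev)
    else findCross rest s

def nearest_to_100_alt (scores : List Int) : Int :=
  let sums := buildSums scores 0
  match findCross sums 0 with
  | some r => r
  | none => sums.getLast?.getD 0

-- ===== PRECONDITION & SPEC =====
def Spec_nearest_to_100 (scores : List Int) (out : Int) : Prop := out = nearest_to_100_alt scores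
instance (scores : List Int) (out : Int) : Decidable (Spec_nearest_to_100 scores out) := by unfold Spec_nearest_to_100; infer_instance

-- ===== CLAIM (what is proved, stated in full; the proofs are below) =====
def Claim_equal_nearest_to_100 : Prop := ∀ (scores : List Int), Dom_nearest_to_100 scores → Spec_nearest_to_100 scores (nearest_to_100 scores)

-- ===== LEMMAS AND PROOFS =====
def finishA (r : Int × Int) : Int :=
  if r.1 ≤ 100 then r.1
  else if r.1 - 100 ≤ 100 - r.2 then r.1 else r.2

def bSide (xs : List Int) (t : Int) : Int :=
  match findCross (buildSums xs t) t with
  | some r => r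
  | none => (buildSums xs t).getLast?.getD t

theorem getLast_getD_cons (a d : Int) (l : List Int) :
    (a :: l).getLast?.getD d = l.getLast?.getD a := by
  cases l with
  | nil => simp
  | cons b l' => induction l' generalizing b with
    | nil => rfl
    | cons c l'' ih2 => simpa [List.getLast?_cons_cons] using ih2 c

theorem main_lemma (xs : List Int) : ∀ (t p : Int), t < 100 →
    finishA (nearestLoopA xs t p) = bSide xs t := by
  induction xs with
  | nil =>
    intro t p ht
    simp [nearestLoopA, bSide, buildSums, findCross, finishA]
    omega
  | cons x rest ih =>
    intro t p ht
    by_cases h : t + x ≥ 100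
    · simp only [nearestLoopA, bSide, buildSums, findCross, if_pos h, finishA]
      split_ifs <;> omega
    · simp only [nearestLoopA, bSide, buildSums, findCross, if_neg h]
      have := ih (t + x) t (by omega)
      rw [this]
      simp only [bSide]
      cases hc : findCross (buildSums rest (t + x)) (t + x) with
      | some r => rfl
      | none => simp [getLast_getD_cons]

-- ===== VERDICT (by name: the statement is the Claim_ definition above) =====
theorem nearest_to_100_spec : Claim_equal_nearest_to_100 := by
  intro scores _
  unfold Spec_nearest_to_100 nearest_to_100 nearest_to_100_alt
  have := main_lemma scores 0 0 (by norm_num)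
  simpa [finishA, bSide] using this
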